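-- pv_equiv track=rewrite | github.com/ItchyHiker/Data_Structures_and_Algorithms_in_Python | chap01/R-1.6.py | oddPositiveSumSquare
-- ===== SOURCE A (Python) =====
-- def oddPositiveSumSquare(n):
--     """return the sum of squares of all the odd positive integers less than n"""
--     if not isinstance(n, (int)):
--         raise TypeError("x must be integer.")
--     if n <= 0:
--         raise ValueError("n must be positive.")
--     if n == 1:
--         return 1
--     else:
--         return sum([x*x for x in range(1, n) if x%2])
-- ===== SOURCE B (Python) =====
-- def oddPositiveSumSquare(n):
--     """return the sum of squares of all the odd positive integers less than n"""
--     if not isinstance(n, int):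
--         raise TypeError("x must be integer.")
--     if n <= 0:
--         raise ValueError("n must be positive.")
--     k = n // 2  # number of odd positive integers below n
--     return k * (2 * k - 1) * (2 * k + 1) // 3
-- ===== Notes on version B (the rewrite author's own statement) =====
-- stated objective: faster
-- what changed: Replaced the O(n) list-comprehension sum with the closed form k(2k-1)(2k+1)/3 where k = n//2.
-- intended difference: On n == 1 A's special case returns 1, but there are no odd positive integers below 1, so B returns the intended 0. — e.g. on oddPositiveSumSquare(1): A returns 1, B returns 0
import Mathlib
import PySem

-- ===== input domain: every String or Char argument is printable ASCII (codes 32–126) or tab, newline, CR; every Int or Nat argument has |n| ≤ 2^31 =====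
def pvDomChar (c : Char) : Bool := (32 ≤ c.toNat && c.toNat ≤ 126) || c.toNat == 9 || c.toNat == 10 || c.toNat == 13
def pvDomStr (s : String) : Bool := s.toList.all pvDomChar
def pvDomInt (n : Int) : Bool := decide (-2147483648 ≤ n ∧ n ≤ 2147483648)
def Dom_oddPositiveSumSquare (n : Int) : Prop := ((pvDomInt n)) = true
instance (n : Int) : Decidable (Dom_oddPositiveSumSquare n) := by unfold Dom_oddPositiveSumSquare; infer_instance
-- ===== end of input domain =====

-- B replaces A's O(n) comprehension sum by the closed form k(2k-1)(2k+1)/3, k = n//2;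
-- on n = 1 B returns the intended 0 where A's special case returns 1.

-- ===== PORT A =====
def oddPositiveSumSquare (n : Int) : Int :=
  if n == 1 then 1
  else (((PySem.List.pyRange 1 n 1).filter (fun x => PySem.Int.mod x 2 != 0)).map (fun x => x * x)).sum

-- ===== PORT B =====
def oddPositiveSumSquare_alt (n : Int) : Int :=
  let k := PySem.Int.floordiv n 2
  PySem.Int.floordiv (k * (2 * k - 1) * (2 * k + 1)) 3

-- ===== PRECONDITION & SPEC =====
-- A raises ValueError on n <= 0 (and TypeError on non-int, which the type convention already excludes).
def Pre_oddPositiveSumSquare (n : Int) : Prop := 1 ≤ n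
instance (n : Int) : Decidable (Pre_oddPositiveSumSquare n) := by unfold Pre_oddPositiveSumSquare; infer_instance
def pvWitness_oddPositiveSumSquare : Int := 7

-- On n = 1 A's special case returns 1, but there are no odd positive integers below 1, so B returns the intended 0.
def D_oddPositiveSumSquare (n : Int) : Prop := n = 1
instance (n : Int) : Decidable (D_oddPositiveSumSquare n) := by unfold D_oddPositiveSumSquare; infer_instance
def Spec_oddPositiveSumSquare (n : Int) (out : Int) : Prop := ¬ D_oddPositiveSumSquare n → out = oddPositiveSumSquare_alt n
instance (n : Int) (out : Int) : Decidable (Spec_oddPositiveSumSquare n out) := by unfold Spec_oddPositiveSumSquare; infer_instance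
def pvDiffWitness_oddPositiveSumSquare : Int := 1
def pvDiffWitnessOut_oddPositiveSumSquare : Int × Int := (1, 0)

-- ===== CLAIM (what is proved, stated in full; the proofs are below) =====
def Claim_unchanged_oddPositiveSumSquare : Prop := ∀ (n : Int), Dom_oddPositiveSumSquare n → Pre_oddPositiveSumSquare n → Spec_oddPositiveSumSquare n (oddPositiveSumSquare n)
def Claim_changed_oddPositiveSumSquare : Prop := Dom_oddPositiveSumSquare (pvDiffWitness_oddPositiveSumSquare) ∧ Pre_oddPositiveSumSquare (pvDiffWitness_oddPositiveSumSquare) ∧ D_oddPositiveSumSquare (pvDiffWitness_oddPositiveSumSquare) ∧ oddPositiveSumSquare (pvDiffWitness_oddPositiveSumSquare) = pvDiffWitnessOut_oddPositiveSumSquare.1 ∧ oddPositiveSumSquare_alt (pvDiffWitness_oddPositiveSumSquare) = pvDiffWitnessOut_oddPositiveSumSquare.2 ∧ pvDiffWitnessOut_oddPositiveSumSquare.1 ≠ pvDiffWitnessOut_oddPositiveSumSquare.2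
def Claim_exact_oddPositiveSumSquare : Prop := ∀ (n : Int), Dom_oddPositiveSumSquare n → Pre_oddPositiveSumSquare n → D_oddPositiveSumSquare n → oddPositiveSumSquare n ≠ oddPositiveSumSquare_alt n

-- ===== LEMMAS AND PROOFS =====

-- A's comprehension sum over range(1, m) equals the closed form, multiplied out: 3·sum = k(2k-1)(2k+1), k = m/2.
theorem pvSum_closed (m : Nat) :
    3 * (((PySem.List.pyRange 1 (m : Int) 1).filter (fun x => PySem.Int.mod x 2 != 0)).map (fun x => x * x)).sum
      = ((m / 2 : Nat) : Int) * (2 * ((m / 2 : Nat) : Int) - 1) * (2 * ((m / 2 : Nat) : Int) + 1) := by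
  induction m with
  | zero => decide
  | succ m ih =>
    rcases Nat.eq_zero_or_pos m with hm | hm
    · subst hm; decide
    · have h1 : (1 : Int) ≤ (m : Int) := by exact_mod_cast hm
      have : ((m + 1 : Nat) : Int) = (m : Int) + 1 := by push_cast; ring
      rw [this, PySem.List.pyRange_one_succ_right h1, List.filter_append, List.map_append,
        List.sum_append]
      have hmod : PySem.Int.mod (m : Int) 2 = ((m % 2 : Nat) : Int) :=
        PySem.Int.mod_natCast m 2
      rcases Nat.even_or_odd m with ⟨t, ht⟩ | ⟨t, ht⟩
      · have hms : m % 2 = 0 := by omega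
        have hd2 : (m + 1) / 2 = m / 2 := by omega
        have hpred : ((PySem.Int.mod (m : Int) 2) != 0) = false := by
          rw [hmod, hms]; simp
        simp only [List.filter_cons, List.filter_nil, hpred, Bool.false_eq_true, if_false,
          List.map_nil, List.sum_nil, add_zero, hd2]
        exact ih
      · have hms : m % 2 = 1 := by omega
        have hd2 : (m + 1) / 2 = m / 2 + 1 := by omega
        have hd2' : m / 2 = t := by omega
        have hpred : ((PySem.Int.mod (m : Int) 2) != 0) = true := by
          rw [hmod, hms]; simp
        simp only [List.filter_cons, List.filter_nil, hpred, if_true, List.map_cons,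
          List.map_nil, List.sum_cons, List.sum_nil, add_zero]
        rw [mul_add, ih, hd2, hd2']
        push_cast [ht]
        ring

theorem oddPositiveSumSquare_spec : Claim_unchanged_oddPositiveSumSquare := by
  intro n _ hpre hd
  unfold oddPositiveSumSquare oddPositiveSumSquare_alt
  have hn1 : n ≠ 1 := hd
  have hbe : (n == 1) = false := by simpa using hn1
  rw [hbe]
  simp only [Bool.false_eq_true, if_false]
  have h1n : (1 : Int) ≤ n := hpre
  -- identify n with a Nat
  obtain ⟨m, rfl⟩ : ∃ m : Nat, n = (m : Int) := ⟨n.toNat, by omega⟩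
  have hk : PySem.Int.floordiv (m : Int) 2 = ((m / 2 : Nat) : Int) :=
    PySem.Int.floordiv_natCast m 2
  rw [hk]
  have h3 := pvSum_closed m
  have : ((m / 2 : Nat) : Int) * (2 * ((m / 2 : Nat) : Int) - 1) * (2 * ((m / 2 : Nat) : Int) + 1)
      = 3 * (((PySem.List.pyRange 1 (m : Int) 1).filter (fun x => PySem.Int.mod x 2 != 0)).map (fun x => x * x)).sum := h3.symm
  rw [this, PySem.Int.floordiv_eq_ediv_of_pos (by norm_num)]
  omega

theorem oddPositiveSumSquare_changed : Claim_changed_oddPositiveSumSquare := by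
  unfold Claim_changed_oddPositiveSumSquare; decide

theorem oddPositiveSumSquare_tight : Claim_exact_oddPositiveSumSquare := by
  intro n _ _ hd
  subst hd
  decide
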